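-- pv_equiv track=rewrite | github.com/jhoanseb/UvaJudge | change.py | tendero
-- ===== SOURCE A (Python) =====
-- def tendero(C,X):
--   ans = list()
--   for i in range(X+1):
--     n,s=0,i
--     for j in range(len(C)-1,-1,-1):
--       tmp = s//C[j]
--       n+=tmp
--       s-=tmp*C[j]
--     ans.append(n)
--   return ans
-- ===== SOURCE B (Python) =====
-- def tendero(C, X):
--     if not C:
--         return [0] * (X + 1) if X >= 0 else []
--     rev = C[::-1]
--     c0 = rev[0]
--     rest = rev[1:]
--     g = {}
--     out = []
--     for i in range(X + 1):
--         q, r = divmod(i, c0)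
--         v = g.get(r)
--         if v is None:
--             n, s = 0, r
--             for c in rest:
--                 n += s // c
--                 s %= c
--             g[r] = v = n
--         out.append(q + v)
--     return out
-- ===== Notes on version B (the rewrite author's own statement) =====
-- stated objective: alternative
-- what changed: Instead of re-scanning all coins for every value, B splits off the first-processed coin (ans[i] = i//c0 + g(i % c0)) and memoizes g per residue in a dict, so the coin scan runs once per distinct residue; trades the nested loops of A for a memo table.
import Mathlib
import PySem

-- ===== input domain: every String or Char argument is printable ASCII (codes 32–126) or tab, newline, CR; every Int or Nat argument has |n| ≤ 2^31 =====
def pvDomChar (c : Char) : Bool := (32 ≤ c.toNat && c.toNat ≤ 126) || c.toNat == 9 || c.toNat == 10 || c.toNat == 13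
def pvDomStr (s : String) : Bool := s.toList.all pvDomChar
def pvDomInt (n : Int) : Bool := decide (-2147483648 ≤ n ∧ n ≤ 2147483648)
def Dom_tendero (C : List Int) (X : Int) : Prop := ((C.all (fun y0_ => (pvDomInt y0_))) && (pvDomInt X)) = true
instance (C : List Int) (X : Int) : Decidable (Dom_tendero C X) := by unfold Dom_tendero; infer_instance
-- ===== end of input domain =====

-- B splits off the first-processed coin (ans[i] = i//c0 + g(i % c0)) and memoizes g per residue
-- in a dict, so the per-value coin scan runs once per distinct residue instead of once per value.

-- ===== PORT A =====
def tendero (C : List Int) (X : Int) : List Int :=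
  (PySem.List.pyRange 0 (X + 1) 1).foldl
    (fun ans i =>
      let p := (PySem.List.pyRange ((C.length : Int) - 1) (-1) (-1)).foldl
        (fun (ns : Int × Int) j =>
          let c := PySem.List.pyGetD C j 0
          let tmp := PySem.Int.floordiv ns.2 c
          (ns.1 + tmp, ns.2 - tmp * c)) ((0 : Int), i)
      ans ++ [p.1]) []

-- ===== PORT B =====
def tendero_alt (C : List Int) (X : Int) : List Int :=
  match C.reverse with
  | [] => if 0 ≤ X then List.replicate (X + 1).toNat 0 else []
  | c0 :: rest =>
      ((PySem.List.pyRange 0 (X + 1) 1).foldl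
        (fun (st : PySem.Dict Int Int × List Int) i =>
          let q := PySem.Int.floordiv i c0
          let r := PySem.Int.mod i c0
          match PySem.Dict.get? st.1 r with
          | some v => (st.1, st.2 ++ [q + v])
          | none =>
              let v := (rest.foldl (fun (ns : Int × Int) c =>
                  (ns.1 + PySem.Int.floordiv ns.2 c, PySem.Int.mod ns.2 c)) ((0 : Int), r)).1
              (PySem.Dict.insert st.1 r v, st.2 ++ [q + v]))
        (PySem.Dict.empty, [])).2

-- ===== PRECONDITION & SPEC =====
-- Pre_ excludes exactly the inputs where Python A raises ZeroDivisionError: a zero coin with X ≥ 0.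
def Pre_tendero (C : List Int) (X : Int) : Prop := X < 0 ∨ ¬ (0 ∈ C)
instance (C : List Int) (X : Int) : Decidable (Pre_tendero C X) := by unfold Pre_tendero; infer_instance
def pvWitness_tendero : List Int × Int := ([1, 3, 5], 7)

def Spec_tendero (C : List Int) (X : Int) (out : List Int) : Prop := out = tendero_alt C X
instance (C : List Int) (X : Int) (out : List Int) : Decidable (Spec_tendero C X out) := by unfold Spec_tendero; infer_instance

-- ===== CLAIM (what is proved, stated in full; the proofs are below) =====
def Claim_equal_tendero : Prop := ∀ (C : List Int) (X : Int), Dom_tendero C X → Pre_tendero C X → Spec_tendero C X (tendero C X)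

-- ===== LEMMAS AND PROOFS =====

-- reference chain: quotient-sum of the remainder chain over the (already reversed) coin list
def tenderoCount (coins : List Int) (s : Int) : Int :=
  match coins with
  | [] => 0
  | c :: rest => PySem.Int.floordiv s c + tenderoCount rest (PySem.Int.mod s c)

-- A's inner step and B's inner step are the same function
theorem tendero_step_eq :
    (fun (ns : Int × Int) (c : Int) =>
      let tmp := PySem.Int.floordiv ns.2 c
      (ns.1 + tmp, ns.2 - tmp * c))
    = (fun (ns : Int × Int) (c : Int) =>
      (ns.1 + PySem.Int.floordiv ns.2 c, PySem.Int.mod ns.2 c)) := by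
  funext ns c
  have h := PySem.Int.floordiv_mul_add_mod ns.2 c
  simp only [Prod.mk.injEq]
  exact ⟨trivial, by linarith⟩

-- the pair fold computes n + tenderoCount in its first component
theorem tendero_inner (coins : List Int) (n s : Int) :
    (coins.foldl (fun (ns : Int × Int) c =>
        (ns.1 + PySem.Int.floordiv ns.2 c, PySem.Int.mod ns.2 c)) (n, s)).1
      = n + tenderoCount coins s := by
  induction coins generalizing n s with
  | nil => simp [tenderoCount]
  | cons c rest ih =>
      simp only [List.foldl_cons, tenderoCount, ih]
      ring

-- the countdown index fold over C is the element fold over C.reverse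
theorem tendero_index_fold (C : List Int) (init : Int × Int) :
    (PySem.List.pyRange ((C.length : Int) - 1) (-1) (-1)).foldl
      (fun (ns : Int × Int) j =>
        let tmp := PySem.Int.floordiv ns.2 (PySem.List.pyGetD C j 0)
        (ns.1 + tmp, ns.2 - tmp * (PySem.List.pyGetD C j 0))) init
    = C.reverse.foldl (fun (ns : Int × Int) c =>
        let tmp := PySem.Int.floordiv ns.2 c
        (ns.1 + tmp, ns.2 - tmp * c)) init := by
  have h1 : PySem.List.pyRange ((C.length : Int) - 1) (-1) (-1)
      = (PySem.List.pyRange 0 (C.length : Int) 1).reverse := by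
    have := PySem.List.pyRange_neg_one_eq_reverse ((C.length : Int) - 1) (-1)
    simpa using this
  rw [h1]
  have h2 : ((PySem.List.pyRange 0 (C.length : Int) 1).map (fun j => PySem.List.pyGetD C j 0)) = C := by
    simpa using PySem.List.map_pyGetD_pyRange_zero C 0
  calc (PySem.List.pyRange 0 (C.length : Int) 1).reverse.foldl
        (fun (ns : Int × Int) j =>
          let tmp := PySem.Int.floordiv ns.2 (PySem.List.pyGetD C j 0)
          (ns.1 + tmp, ns.2 - tmp * (PySem.List.pyGetD C j 0))) init
      = (((PySem.List.pyRange 0 (C.length : Int) 1).reverse.map (fun j => PySem.List.pyGetD C j 0)).foldl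
        (fun (ns : Int × Int) c =>
          let tmp := PySem.Int.floordiv ns.2 c
          (ns.1 + tmp, ns.2 - tmp * c)) init) := by rw [List.foldl_map]
    _ = _ := by rw [List.map_reverse, h2]

-- appending-fold version of map
theorem tendero_outer (l : List Int) (f : Int → Int) (acc : List Int) :
    l.foldl (fun ans i => ans ++ [f i]) acc = acc ++ l.map f := by
  induction l generalizing acc with
  | nil => simp
  | cons x xs ih => simp [ih]

-- A produces the map of tenderoCount over the range
theorem tendero_eq_map (C : List Int) (X : Int) :
    tendero C X = (PySem.List.pyRange 0 (X + 1) 1).map (fun i => tenderoCount C.reverse i) := by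
  unfold tendero
  have hfun : (fun (ans : List Int) (i : Int) =>
      let p := (PySem.List.pyRange ((C.length : Int) - 1) (-1) (-1)).foldl
        (fun (ns : Int × Int) j =>
          let c := PySem.List.pyGetD C j 0
          let tmp := PySem.Int.floordiv ns.2 c
          (ns.1 + tmp, ns.2 - tmp * c)) ((0 : Int), i)
      ans ++ [p.1])
      = (fun (ans : List Int) (i : Int) => ans ++ [tenderoCount C.reverse i]) := by
    funext ans i
    simp only [tendero_index_fold C ((0 : Int), i), tendero_step_eq, tendero_inner]
    simp
  rw [hfun]
  exact tendero_outer _ _ []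

-- B's per-range fold with memo dict: the invariant "every dict entry is tenderoCount rest"
theorem tendero_memo_fold (c0 : Int) (rest : List Int) (L : List Int)
    (g : PySem.Dict Int Int) (out : List Int)
    (hg : ∀ k v, PySem.Dict.get? g k = some v → v = tenderoCount rest k) :
    (L.foldl
        (fun (st : PySem.Dict Int Int × List Int) i =>
          let q := PySem.Int.floordiv i c0
          let r := PySem.Int.mod i c0
          match PySem.Dict.get? st.1 r with
          | some v => (st.1, st.2 ++ [q + v])
          | none =>
              let v := (rest.foldl (fun (ns : Int × Int) c =>
                  (ns.1 + PySem.Int.floordiv ns.2 c, PySem.Int.mod ns.2 c)) ((0 : Int), r)).1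
              (PySem.Dict.insert st.1 r v, st.2 ++ [q + v]))
        (g, out)).2
    = out ++ L.map (fun i => PySem.Int.floordiv i c0 + tenderoCount rest (PySem.Int.mod i c0)) := by
  induction L generalizing g out with
  | nil => simp
  | cons i L ih =>
      simp only [List.foldl_cons, List.map_cons]
      cases hget : PySem.Dict.get? g (PySem.Int.mod i c0) with
      | some v =>
          simp only [hget]
          rw [ih g _ hg, hg _ _ hget]
          simp
      | none =>
          simp only [hget]
          rw [ih _ _ ?_]
          · simp [tendero_inner]
          · intro k v hkv
            by_cases hk : k = PySem.Int.mod i c0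
            · subst hk
              rw [PySem.Dict.get?_insert_self] at hkv
              simp only [tendero_inner, Option.some.injEq] at hkv
              omega
            · rw [PySem.Dict.get?_insert_of_ne _ _ hk] at hkv
              exact hg _ _ hkv

-- ===== VERDICT (by name: the statement is the Claim_ definition above) =====
theorem tendero_spec : Claim_equal_tendero := by
  intro C X _ _
  unfold Spec_tendero
  rw [tendero_eq_map]
  unfold tendero_alt
  cases hrev : C.reverse with
  | nil =>
      dsimp only
      by_cases hX : 0 ≤ X
      · simp only [if_pos hX, tenderoCount]
        rw [PySem.List.pyRange_one 0 (X + 1)]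
        simp only [List.map_map, Function.comp_def]
        rw [List.map_const']
        simp only [List.length_range]
        congr 1
        omega
      · have : X + 1 ≤ 0 := by omega
        rw [PySem.List.pyRange_one_eq_nil this]
        simp [hX]
  | cons c0 rest =>
      dsimp only
      rw [tendero_memo_fold c0 rest _ PySem.Dict.empty []
        (by intro k v h; rw [PySem.Dict.get?_empty] at h; cases h)]
      simp [tenderoCount]
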